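-- pv_equiv track=rewrite | github.com/chicolismo/Aprendizado-Ensemble | test_and_training.py | sum_tp_fp_fn
-- ===== SOURCE A (Python) =====
-- def sum_tp_fp_fn(confusionMatrix, c=None):
--     '''Retorna a soma dos verdadeiros positivos, falsos positivos e falsos negativos
--     c = classe a ter a soma retornada: se None, faz a soma de todas as classes'''
--     tp = 0
--     fp = 0
--     fn = 0
--     if c != None:
--         tp = confusionMatrix[c][c]
--         for l in confusionMatrix:
--             if c != l:
--                 fp += confusionMatrix[l][c]
--                 fn += confusionMatrix[c][l]
--         return tp, fp, fn
--     else: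
--         for l in confusionMatrix:
--             for l2 in confusionMatrix:
--                 if l != l2:
--                     fp += confusionMatrix[l2][l]
--                     fn += confusionMatrix[l][l2]
--                 else:
--                     tp += confusionMatrix[l][l2]
--         return tp, fp, fn
-- ===== SOURCE B (Python) =====
-- def sum_tp_fp_fn(confusionMatrix, c=None):
--     '''For a given class: cache the class row and walk the dict items once,
--     reading each row's c-column directly.  For the total (c=None): a triangular
--     scan over unordered key pairs — fp and fn are both the sum of all
--     off-diagonal cells, so each pair {k, r} is visited once and contributes
--     M[r][k] + M[k][r] to a single shared accumulator, halving the inner loop.'''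
--     if c is not None:
--         crow = confusionMatrix[c]
--         tp = crow[c]
--         fp = sum(row[c] for l, row in confusionMatrix.items() if l != c)
--         fn = sum(crow[l] for l in confusionMatrix if l != c)
--         return tp, fp, fn
--     keys = list(confusionMatrix)
--     tp = 0
--     off = 0
--     for i, k in enumerate(keys):
--         tp += confusionMatrix[k][k]
--         for r in keys[i + 1:]:
--             off += confusionMatrix[r][k] + confusionMatrix[k][r]
--     return tp, off, off
-- ===== Notes on version B (the rewrite author's own statement) =====
-- stated objective: alternative
-- what changed: In the total (c=None) case B exploits fp = fn = sum of all off-diagonal cells and does a triangular scan over unordered key pairs, visiting each pair once and adding M[r][k]+M[k][r] to one shared accumulator, instead of A's full conditional double loop with three accumulators; in the per-class case B caches the class row and walks the dict items once instead of repeated outer dict lookups. Pre_ excludes inputs where A raises KeyError (class c missing, or a row lacking a needed column) and association lists with duplicate keys, which do not represent a Python dict.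
import Mathlib
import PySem

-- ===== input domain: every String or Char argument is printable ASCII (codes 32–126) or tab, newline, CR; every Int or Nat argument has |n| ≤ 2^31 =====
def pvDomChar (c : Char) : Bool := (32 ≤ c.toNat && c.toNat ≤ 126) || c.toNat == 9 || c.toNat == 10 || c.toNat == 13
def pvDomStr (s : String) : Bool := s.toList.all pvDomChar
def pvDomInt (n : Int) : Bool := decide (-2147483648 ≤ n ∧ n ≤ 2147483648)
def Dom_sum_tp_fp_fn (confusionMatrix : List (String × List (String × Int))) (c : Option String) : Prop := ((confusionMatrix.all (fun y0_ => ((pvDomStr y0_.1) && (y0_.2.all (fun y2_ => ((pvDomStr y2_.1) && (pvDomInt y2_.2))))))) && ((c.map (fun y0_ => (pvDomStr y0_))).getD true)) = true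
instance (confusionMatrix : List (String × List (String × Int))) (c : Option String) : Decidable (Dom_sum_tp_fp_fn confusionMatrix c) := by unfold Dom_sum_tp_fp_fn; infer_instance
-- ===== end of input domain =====

-- B replaces A's conditional double loop by a triangular scan over unordered key pairs in the
-- total case (fp = fn = off-diagonal sum, each pair visited once) and, for a given class, by a
-- single items() pass with the class row cached; alternative decomposition, same asymptotic cost.


-- ===== PORT A =====
-- dict-of-dicts cell access: confusionMatrix[a][b] (first-match lookup; Pre_ guarantees presence)
def pvRow (confusionMatrix : List (String × List (String × Int))) (a : String) : List (String × Int) :=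
  (confusionMatrix.lookup a).getD []

def pvCell (confusionMatrix : List (String × List (String × Int))) (a b : String) : Int :=
  ((pvRow confusionMatrix a).lookup b).getD 0

def sum_tp_fp_fn (confusionMatrix : List (String × List (String × Int))) (c : Option String) : Int × Int × Int :=
  let keys := confusionMatrix.map (·.1)
  match c with
  | some c =>
    let tp := pvCell confusionMatrix c c
    let p := keys.foldl
      (fun (p : Int × Int) l =>
        if c ≠ l then (p.1 + pvCell confusionMatrix l c, p.2 + pvCell confusionMatrix c l) else p)
      (0, 0)
    (tp, p.1, p.2)
  | none =>
    keys.foldl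
      (fun (s : Int × Int × Int) l =>
        keys.foldl
          (fun (s : Int × Int × Int) l2 =>
            if l ≠ l2 then
              (s.1, s.2.1 + pvCell confusionMatrix l2 l, s.2.2 + pvCell confusionMatrix l l2)
            else
              (s.1 + pvCell confusionMatrix l l2, s.2.1, s.2.2))
          s)
      (0, 0, 0)

-- ===== PORT B =====
-- triangular scan: 'for i, k in enumerate(keys): for r in keys[i+1:]' as structural recursion,
-- each unordered pair contributing both orders to one shared off-diagonal accumulator
def pvTri (confusionMatrix : List (String × List (String × Int))) : List String → Int × Int
  | [] => (0, 0)
  | k :: rest =>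
    let d := pvCell confusionMatrix k k
    let o := (rest.map (fun r => pvCell confusionMatrix r k + pvCell confusionMatrix k r)).sum
    let p := pvTri confusionMatrix rest
    (d + p.1, o + p.2)

def sum_tp_fp_fn_alt (confusionMatrix : List (String × List (String × Int))) (c : Option String) : Int × Int × Int :=
  match c with
  | some c =>
    let crow := (confusionMatrix.lookup c).getD []
    let tp := (crow.lookup c).getD 0
    let fp := ((confusionMatrix.filter (fun r => r.1 ≠ c)).map (fun r => (r.2.lookup c).getD 0)).sum
    let fn := (((confusionMatrix.map (·.1)).filter (fun l => l ≠ c)).map (fun l => (crow.lookup l).getD 0)).sum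
    (tp, fp, fn)
  | none =>
    let p := pvTri confusionMatrix (confusionMatrix.map (·.1))
    (p.1, p.2, p.2)

-- ===== PRECONDITION & SPEC =====
-- Pre_ excludes inputs where A raises KeyError (class c not a key, or a row lacking a needed
-- column) and association lists with duplicate keys (outer or within a row), which are not a
-- faithful dict representation (dict building overwrites; list lookup takes the first match).
def Pre_sum_tp_fp_fn (confusionMatrix : List (String × List (String × Int))) (c : Option String) : Prop :=
  (confusionMatrix.map (·.1)).Nodup ∧
  (∀ r ∈ confusionMatrix, (r.2.map (·.1)).Nodup) ∧
  match c with
  | none => ∀ r ∈ confusionMatrix, ∀ l2 ∈ confusionMatrix.map (·.1), l2 ∈ r.2.map (·.1)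
  | some c => c ∈ confusionMatrix.map (·.1) ∧
      ∀ r ∈ confusionMatrix, c ∈ r.2.map (·.1) ∧ (r.1 = c → ∀ l ∈ confusionMatrix.map (·.1), l ∈ r.2.map (·.1))

instance (confusionMatrix : List (String × List (String × Int))) (c : Option String) : Decidable (Pre_sum_tp_fp_fn confusionMatrix c) := by
  unfold Pre_sum_tp_fp_fn
  rcases c with _ | c <;> infer_instance

def pvWitness_sum_tp_fp_fn : (List (String × List (String × Int))) × Option String :=
  ([("a", [("a", 1), ("b", 2)]), ("b", [("a", 3), ("b", 4)])], none)

def Spec_sum_tp_fp_fn (confusionMatrix : List (String × List (String × Int))) (c : Option String) (out : Int × Int × Int) : Prop := out = sum_tp_fp_fn_alt confusionMatrix c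
instance (confusionMatrix : List (String × List (String × Int))) (c : Option String) (out : Int × Int × Int) : Decidable (Spec_sum_tp_fp_fn confusionMatrix c out) := by unfold Spec_sum_tp_fp_fn; infer_instance

-- ===== CLAIM (what is proved, stated in full; the proofs are below) =====
def Claim_equal_sum_tp_fp_fn : Prop := ∀ (confusionMatrix : List (String × List (String × Int))) (c : Option String), Dom_sum_tp_fp_fn confusionMatrix c → Pre_sum_tp_fp_fn confusionMatrix c → Spec_sum_tp_fp_fn confusionMatrix c (sum_tp_fp_fn confusionMatrix c)

-- ===== LEMMAS AND PROOFS =====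

theorem pv_sum_map_add {α : Type} (xs : List α) (f g : α → Int) :
    (xs.map (fun x => f x + g x)).sum = (xs.map f).sum + (xs.map g).sum := by
  induction xs with
  | nil => simp
  | cons a xs ih => simp [ih]; ring

theorem pv_sum_map_sub {α : Type} (xs : List α) (f g : α → Int) :
    (xs.map (fun x => f x - g x)).sum = (xs.map f).sum - (xs.map g).sum := by
  induction xs with
  | nil => simp
  | cons a xs ih => simp [ih]; ring

-- Fubini for double list sums
theorem pv_sum_comm {α : Type} (xs ys : List α) (g : α → α → Int) :
    (xs.map (fun a => (ys.map (fun b => g a b)).sum)).sum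
      = (ys.map (fun b => (xs.map (fun a => g a b)).sum)).sum := by
  induction xs with
  | nil => simp
  | cons a xs ih =>
      simp only [List.map_cons, List.sum_cons, ih, pv_sum_map_add]

theorem pv_foldl_pair {α : Type} (xs : List α) (u v : α → Int) (a b : Int) :
    xs.foldl (fun (p : Int × Int) x => (p.1 + u x, p.2 + v x)) (a, b)
      = (a + (xs.map u).sum, b + (xs.map v).sum) := by
  induction xs generalizing a b with
  | nil => simp
  | cons x xs ih =>
      simp only [List.foldl_cons, ih, List.map_cons, List.sum_cons, Prod.mk.injEq]
      constructor <;> ring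

theorem pv_foldl_triple {α : Type} (xs : List α) (u v w : α → Int) (a b cc : Int) :
    xs.foldl (fun (s : Int × Int × Int) x => (s.1 + u x, s.2.1 + v x, s.2.2 + w x)) (a, b, cc)
      = (a + (xs.map u).sum, b + (xs.map v).sum, cc + (xs.map w).sum) := by
  induction xs generalizing a b cc with
  | nil => simp
  | cons x xs ih =>
      simp only [List.foldl_cons, ih, List.map_cons, List.sum_cons, Prod.mk.injEq]
      refine ⟨by ring, by ring, by ring⟩

theorem pv_sum_if_not_mem {α : Type} [DecidableEq α] (xs : List α) (c : α) (f : α → Int)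
    (h : c ∉ xs) :
    (xs.map (fun x => if c ≠ x then f x else 0)).sum = (xs.map f).sum := by
  induction xs with
  | nil => simp
  | cons a xs ih =>
      simp only [List.mem_cons, not_or] at h
      rw [List.map_cons, List.sum_cons, if_pos h.1, ih h.2, List.map_cons, List.sum_cons]

theorem pv_sum_if_ne {α : Type} [DecidableEq α] (xs : List α) (c : α) (f : α → Int)
    (hnd : xs.Nodup) (hc : c ∈ xs) :
    (xs.map (fun x => if c ≠ x then f x else 0)).sum = (xs.map f).sum - f c := by
  induction xs with
  | nil => simp at hc
  | cons a xs ih =>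
      rcases List.nodup_cons.mp hnd with ⟨ha, hnd'⟩
      rcases List.mem_cons.mp hc with h | h
      · subst h
        rw [List.map_cons, List.sum_cons, if_neg (fun hne => hne rfl),
            pv_sum_if_not_mem xs c f ha, List.map_cons, List.sum_cons]
        ring
      · have hca : c ≠ a := fun e => ha (e ▸ h)
        rw [List.map_cons, List.sum_cons, if_pos hca, ih hnd' h,
            List.map_cons, List.sum_cons]
        ring

-- the diagonal pick
theorem pv_sum_if_eq {α : Type} [DecidableEq α] (xs : List α) (c : α) (f : α → Int)
    (hnd : xs.Nodup) (hc : c ∈ xs) :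
    (xs.map (fun x => if c ≠ x then 0 else f x)).sum = f c := by
  have hpt : ∀ x ∈ xs, (if c ≠ x then (0 : Int) else f x)
      = f x - (if c ≠ x then f x else 0) := by
    intro x _; by_cases h : c ≠ x <;> simp [h]
  rw [List.map_congr_left hpt, pv_sum_map_sub, pv_sum_if_ne xs c f hnd hc]
  ring

-- filtered generator sum = conditional sum
theorem pv_filter_map_sum {α : Type} (xs : List α) (p : α → Bool) (h : α → Int) :
    ((xs.filter p).map h).sum = (xs.map (fun x => if p x then h x else 0)).sum := by
  induction xs with
  | nil => simp
  | cons a xs ih =>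
      by_cases hp : p a <;> simp [hp, ih]

-- with distinct outer keys, each row looks itself up
theorem pv_lookup_self (M : List (String × List (String × Int)))
    (hnd : (M.map (·.1)).Nodup) (r : String × List (String × Int)) (hr : r ∈ M) :
    M.lookup r.1 = some r.2 := by
  induction M with
  | nil => simp at hr
  | cons a M ih =>
      rw [List.map_cons, List.nodup_cons] at hnd
      obtain ⟨ha, hnd'⟩ := hnd
      rcases List.mem_cons.mp hr with h | h
      · subst h; simp [List.lookup]
      · have hne : (r.1 == a.1) = false := by
          apply beq_false_of_ne
          intro e
          exact ha (e ▸ List.mem_map_of_mem h)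
        simp [List.lookup, hne, ih hnd' h]

-- off-diagonal double sum, swapped argument order
theorem pv_off_swap {α : Type} [DecidableEq α] (xs : List α) (f : α → α → Int) :
    (xs.map (fun a => (xs.map (fun b => if a ≠ b then f b a else 0)).sum)).sum
      = (xs.map (fun a => (xs.map (fun b => if a ≠ b then f a b else 0)).sum)).sum := by
  rw [pv_sum_comm xs xs (fun a b => if a ≠ b then f b a else 0)]
  refine congrArg _ (List.map_congr_left ?_)
  intro b _
  refine congrArg _ (List.map_congr_left ?_)
  intro a _
  by_cases h : a ≠ b
  · rw [if_pos h, if_pos (Ne.symm h)]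
  · rw [if_neg h, if_neg (fun hb => h (Ne.symm hb))]

-- the triangular scan computes the diagonal sum and the full off-diagonal sum
theorem pv_tri_eq (M : List (String × List (String × Int))) (xs : List String)
    (hnd : xs.Nodup) :
    pvTri M xs
      = ((xs.map (fun l => pvCell M l l)).sum,
         (xs.map (fun a => (xs.map (fun b => if a ≠ b then pvCell M a b else 0)).sum)).sum) := by
  induction xs with
  | nil => simp [pvTri]
  | cons k rest ih =>
      rcases List.nodup_cons.mp hnd with ⟨hk, hnd'⟩
      have hrow : (rest.map (fun b => if k ≠ b then pvCell M k b else 0)).sum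
          = (rest.map (fun b => pvCell M k b)).sum := pv_sum_if_not_mem rest k _ hk
      have hcol' : ∀ a ∈ rest,
          (if a ≠ k then pvCell M a k else 0)
              + (rest.map (fun b => if a ≠ b then pvCell M a b else 0)).sum
            = pvCell M a k + (rest.map (fun b => if a ≠ b then pvCell M a b else 0)).sum := by
        intro a ha
        have hak : a ≠ k := fun e => hk (e ▸ ha)
        rw [if_pos hak]
      simp only [pvTri, ih hnd', List.map_cons, List.sum_cons, Prod.mk.injEq]
      refine ⟨trivial, ?_⟩
      rw [if_neg (fun h => h rfl), hrow, List.map_congr_left hcol',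
          pv_sum_map_add rest (fun r => pvCell M r k) (fun r => pvCell M k r),
          pv_sum_map_add rest (fun a => pvCell M a k)
            (fun a => (rest.map (fun b => if a ≠ b then pvCell M a b else 0)).sum)]
      ring

-- ===== VERDICT (by name: the statement is the Claim_ definition above) =====
theorem sum_tp_fp_fn_spec : Claim_equal_sum_tp_fp_fn := by
  intro M c _hDom hPre
  unfold Spec_sum_tp_fp_fn
  rcases c with _ | c
  · -- c = None: A's conditional double loop vs B's triangular scan
    obtain ⟨hnd, -, -⟩ := hPre
    simp only [sum_tp_fp_fn, sum_tp_fp_fn_alt]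
    set keys := M.map (·.1) with hkeys
    have hinner : ∀ (s : Int × Int × Int) (l : String),
        (keys.foldl
          (fun (s : Int × Int × Int) l2 =>
            if l ≠ l2 then (s.1, s.2.1 + pvCell M l2 l, s.2.2 + pvCell M l l2)
            else (s.1 + pvCell M l l2, s.2.1, s.2.2)) s)
        = (s.1 + (keys.map (fun l2 => if l ≠ l2 then 0 else pvCell M l l2)).sum,
           s.2.1 + (keys.map (fun l2 => if l ≠ l2 then pvCell M l2 l else 0)).sum,
           s.2.2 + (keys.map (fun l2 => if l ≠ l2 then pvCell M l l2 else 0)).sum) := by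
      intro s l
      have hcongr : keys.foldl
          (fun (s : Int × Int × Int) l2 =>
            if l ≠ l2 then (s.1, s.2.1 + pvCell M l2 l, s.2.2 + pvCell M l l2)
            else (s.1 + pvCell M l l2, s.2.1, s.2.2)) s
        = keys.foldl
          (fun (s : Int × Int × Int) l2 =>
            (s.1 + (if l ≠ l2 then 0 else pvCell M l l2),
             s.2.1 + (if l ≠ l2 then pvCell M l2 l else 0),
             s.2.2 + (if l ≠ l2 then pvCell M l l2 else 0))) s := by
        apply PySem.List.foldl_congr_mem
        intro acc x _
        by_cases h : l ≠ x <;> simp [h]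
      rw [hcongr]
      obtain ⟨s1, s2, s3⟩ := s
      rw [pv_foldl_triple]
    have houter : keys.foldl
        (fun (s : Int × Int × Int) l =>
          keys.foldl
            (fun (s : Int × Int × Int) l2 =>
              if l ≠ l2 then (s.1, s.2.1 + pvCell M l2 l, s.2.2 + pvCell M l l2)
              else (s.1 + pvCell M l l2, s.2.1, s.2.2)) s)
        (0, 0, 0)
      = keys.foldl
        (fun (s : Int × Int × Int) l =>
          (s.1 + (keys.map (fun l2 => if l ≠ l2 then 0 else pvCell M l l2)).sum,
           s.2.1 + (keys.map (fun l2 => if l ≠ l2 then pvCell M l2 l else 0)).sum,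
           s.2.2 + (keys.map (fun l2 => if l ≠ l2 then pvCell M l l2 else 0)).sum)) (0, 0, 0) := by
      apply PySem.List.foldl_congr_mem
      intro acc x _
      exact hinner acc x
    have hdiag : ∀ l ∈ keys,
        (keys.map (fun l2 => if l ≠ l2 then 0 else pvCell M l l2)).sum = pvCell M l l := by
      intro l hl
      exact pv_sum_if_eq keys l (fun l2 => pvCell M l l2) hnd hl
    rw [houter, pv_foldl_triple, pv_tri_eq M keys hnd,
        List.map_congr_left hdiag,
        pv_off_swap keys (fun a b => pvCell M a b)]
    simp
  · -- c = some class: A's conditional key loop vs B's cached-row items pass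
    obtain ⟨hnd, -, -, -⟩ := hPre
    simp only [sum_tp_fp_fn, sum_tp_fp_fn_alt]
    set keys := M.map (·.1) with hkeys
    have hcongr : keys.foldl
        (fun (p : Int × Int) l =>
          if c ≠ l then (p.1 + pvCell M l c, p.2 + pvCell M c l) else p) (0, 0)
      = keys.foldl
        (fun (p : Int × Int) l =>
          (p.1 + (if c ≠ l then pvCell M l c else 0),
           p.2 + (if c ≠ l then pvCell M c l else 0))) (0, 0) := by
      apply PySem.List.foldl_congr_mem
      intro acc x _
      by_cases h : c ≠ x <;> simp [h]
    rw [hcongr, pv_foldl_pair]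
    -- fp: B's filtered items pass equals A's conditional column sum
    have hfp : ((M.filter (fun r => r.1 ≠ c)).map (fun r => (r.2.lookup c).getD 0)).sum
        = (keys.map (fun l => if c ≠ l then pvCell M l c else 0)).sum := by
      rw [pv_filter_map_sum]
      have hcell : ∀ r ∈ M,
          (if (r.1 ≠ c : Bool) then (r.2.lookup c).getD 0 else 0)
            = (fun l => if c ≠ l then pvCell M l c else 0) r.1 := by
        intro r hr
        have : pvCell M r.1 c = (r.2.lookup c).getD 0 := by
          simp [pvCell, pvRow, pv_lookup_self M hnd r hr]
        by_cases h : r.1 = c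
        · simp [h]
        · simp [h, Ne.symm h, this]
      rw [List.map_congr_left hcell, hkeys, List.map_map]
      rfl
    -- fn: B's filtered key pass over the cached row equals A's conditional row sum
    have hfn : ((keys.filter (fun l => l ≠ c)).map (fun l => ((M.lookup c).getD []).lookup l |>.getD 0)).sum
        = (keys.map (fun l => if c ≠ l then pvCell M c l else 0)).sum := by
      rw [pv_filter_map_sum]
      refine congrArg _ (List.map_congr_left ?_)
      intro l _
      by_cases h : l = c
      · simp [h]
      · simp [h, Ne.symm h, pvCell, pvRow]
    simp only [hfp, hfn]
    simp [pvCell, pvRow]
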